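-- pv_equiv track=rewrite | github.com/jlgs96/segHSI | networks2/unet2.py | filters2filtersboxconv
-- ===== SOURCE A (Python) =====
-- def filters2filtersboxconv(filters, n_boxes=4):
--     newfilters = []; enc=False; mul=0
--     for f in filters:
--         if f % n_boxes == 0 and enc == False:
--             newfilters.append(f)
--             enc=True
--             mul = f
--         else:
--             if enc:
--                 newfilters.append(mul*2)
--                 mul*=2
--             else:
--                 while f % n_boxes != 0: f += 1
--                 mul = f
--                 newfilters.append(f)
--                 enc=True
--     return newfilters
-- ===== SOURCE B (Python) =====
-- def filters2filtersboxconv(filters, n_boxes=4):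
--     if not filters:
--         return []
--     base = filters[0] + (-filters[0]) % abs(n_boxes)
--     return [base << i for i in range(len(filters))]
-- ===== Notes on version B (the rewrite author's own statement) =====
-- stated objective: simpler
-- what changed: Replaced A's enc/mul state-machine loop (with an inner while rounding up to a multiple) by a closed form: compute the base once from the first element via (-x) % abs(n_boxes), then map each index i to base * 2**i.
import Mathlib
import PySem

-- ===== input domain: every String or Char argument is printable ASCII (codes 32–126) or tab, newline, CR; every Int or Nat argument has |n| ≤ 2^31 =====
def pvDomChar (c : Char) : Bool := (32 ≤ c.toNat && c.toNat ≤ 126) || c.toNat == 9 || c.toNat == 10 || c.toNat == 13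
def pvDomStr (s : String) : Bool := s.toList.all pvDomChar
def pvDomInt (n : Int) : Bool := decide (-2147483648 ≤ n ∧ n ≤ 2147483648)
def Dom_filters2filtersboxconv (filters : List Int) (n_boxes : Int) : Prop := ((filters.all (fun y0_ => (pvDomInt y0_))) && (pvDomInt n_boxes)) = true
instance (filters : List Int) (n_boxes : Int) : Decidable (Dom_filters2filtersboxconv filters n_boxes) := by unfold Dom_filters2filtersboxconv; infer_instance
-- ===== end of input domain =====

-- ===== PORT A =====
-- B replaces A's state-machine loop by a closed form base*2^i; return-value equivalence, no side effects.
-- inner 'while f % n_boxes != 0: f += 1' of A: advances f to the next multiple of |n|.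
-- Ported by hand as the arithmetic jump (exact for every n ≠ 0: one unit per iteration is the
-- same value; the unit-increment loop is not evaluable for |n| up to 2^31).
def pvWhileUp (f n : Int) : Int :=
  if PySem.Int.mod f n = 0 then f else f + (|n| - PySem.Int.mod f |n|)

def pvStepA (n : Int) (st : List Int × Bool × Int) (f : Int) : List Int × Bool × Int :=
  let (newfilters, enc, mul) := st
  if PySem.Int.mod f n = 0 ∧ enc = false then
    (newfilters ++ [f], true, f)
  else if enc then
    (newfilters ++ [mul * 2], true, mul * 2)
  else
    let f' := pvWhileUp f n
    (newfilters ++ [f'], true, f')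

def filters2filtersboxconv (filters : List Int) (n_boxes : Int) : List Int :=
  (filters.foldl (pvStepA n_boxes) ([], false, 0)).1

-- ===== PORT B =====
def filters2filtersboxconv_alt (filters : List Int) (n_boxes : Int) : List Int :=
  match filters with
  | [] => []
  | f0 :: _ =>
    let base := f0 + PySem.Int.mod (-f0) |n_boxes|
    (List.range filters.length).map (fun i : Nat => base <<< i)

-- ===== PRECONDITION & SPEC =====
-- Pre_ excludes exactly ZeroDivisionError: n_boxes = 0 with a nonempty list (the '%' raises).
def Pre_filters2filtersboxconv (filters : List Int) (n_boxes : Int) : Prop :=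
  filters = [] ∨ n_boxes ≠ 0
instance (filters : List Int) (n_boxes : Int) : Decidable (Pre_filters2filtersboxconv filters n_boxes) := by unfold Pre_filters2filtersboxconv; infer_instance

def pvWitness_filters2filtersboxconv : List Int × Int := ([30, 60, 120], 4)

def Spec_filters2filtersboxconv (filters : List Int) (n_boxes : Int) (out : List Int) : Prop := out = filters2filtersboxconv_alt filters n_boxes
instance (filters : List Int) (n_boxes : Int) (out : List Int) : Decidable (Spec_filters2filtersboxconv filters n_boxes out) := by unfold Spec_filters2filtersboxconv; infer_instance

-- ===== CLAIM =====
def Claim_equal_filters2filtersboxconv : Prop := ∀ (filters : List Int) (n_boxes : Int), Dom_filters2filtersboxconv filters n_boxes → Pre_filters2filtersboxconv filters n_boxes → Spec_filters2filtersboxconv filters n_boxes (filters2filtersboxconv filters n_boxes)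

-- ===== LEMMAS AND PROOFS =====

-- the while-loop jump adds exactly the distance to the next multiple of |n|
lemma pvWhileUp_eq (n : Int) (hn : n ≠ 0) (f : Int) :
    pvWhileUp f n = f + -f % |n| := by
  have hM : (0:Int) < |n| := abs_pos.mpr hn
  have hmodeq : PySem.Int.mod f |n| = f % |n| := PySem.Int.mod_eq_emod_of_pos hM
  unfold pvWhileUp
  by_cases h : PySem.Int.mod f n = 0
  · have hdvd : n ∣ f := (PySem.Int.mod_eq_zero_iff_dvd f n).mp h
    have hz : -f % |n| = 0 := by
      rw [PySem.Int.emod_eq_zero_iff_dvd]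
      exact (abs_dvd n (-f)).mpr (dvd_neg.mpr hdvd)
    simp [h, hz]
  · have hdvd : ¬ n ∣ f := fun hd => h ((PySem.Int.mod_eq_zero_iff_dvd f n).mpr hd)
    have h0 : 0 ≤ f % |n| := Int.emod_nonneg _ (by simpa using hn)
    have hlt : f % |n| < |n| := Int.emod_lt_of_pos _ hM
    have hk1 : 1 ≤ f % |n| := by
      rcases (lt_or_eq_of_le h0).symm with h' | h'
      · exfalso
        have : |n| ∣ f := (PySem.Int.emod_eq_zero_iff_dvd f |n|).mp h'.symm
        exact hdvd ((abs_dvd n f).mp this)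
      · omega
    have hq : |n| * (f / |n|) + f % |n| = f := Int.mul_ediv_add_emod _ _
    have hneg : -f = (|n| - f % |n|) + |n| * (-(f / |n|) - 1) := by linear_combination hq
    have h2 : -f % |n| = |n| - f % |n| := by
      rw [hneg, Int.add_mul_emod_self_left, Int.emod_eq_of_lt (by omega) (by omega)]
    rw [hmodeq, h2]
    simp [h]

lemma pvFold_true (n : Int) (xs : List Int) (acc : List Int) (mul : Int) :
    xs.foldl (pvStepA n) (acc, true, mul)
      = (acc ++ (List.range xs.length).map (fun i => mul * 2 ^ (i + 1)), true, mul * 2 ^ xs.length) := by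
  induction xs generalizing acc mul with
  | nil => simp
  | cons f xs ih =>
    have hstep : pvStepA n (acc, true, mul) f = (acc ++ [mul * 2], true, mul * 2) := by
      simp [pvStepA]
    rw [List.foldl_cons, hstep, ih]
    refine Prod.ext ?_ (Prod.ext rfl ?_)
    · simp only [List.length_cons, List.range_succ_eq_map, List.map_cons, List.map_map,
        List.append_assoc, List.singleton_append]
      congr 1
      congr 1
      apply List.map_congr_left
      intro i _
      simp only [Function.comp_apply, pow_succ]
      ring
    · simp [pow_succ]
      ring

-- ===== VERDICT =====
theorem filters2filtersboxconv_spec : Claim_equal_filters2filtersboxconv := by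
  intro filters n hdom hpre
  unfold Spec_filters2filtersboxconv
  match filters with
  | [] => rfl
  | f0 :: rest =>
    have hn : n ≠ 0 := by
      rcases hpre with h | h
      · exact absurd h (by simp)
      · exact h
    have hM : (0:Int) < |n| := abs_pos.mpr hn
    have hmodeq : PySem.Int.mod (-f0) |n| = -f0 % |n| := PySem.Int.mod_eq_emod_of_pos hM
    set base := f0 + -f0 % |n| with hbase
    have hstep : pvStepA n ([], false, 0) f0 = ([base], true, base) := by
      by_cases h : PySem.Int.mod f0 n = 0
      · have hdvd : n ∣ f0 := (PySem.Int.mod_eq_zero_iff_dvd f0 n).mp h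
        have hz : -f0 % |n| = 0 := by
          rw [PySem.Int.emod_eq_zero_iff_dvd]
          exact (abs_dvd n (-f0)).mpr (dvd_neg.mpr hdvd)
        simp [pvStepA, h, hbase, hz]
      · have hlt : -f0 % |n| < |n| := Int.emod_lt_of_pos _ hM
        have h0 : 0 ≤ -f0 % |n| := Int.emod_nonneg _ (by simpa using hn)
        have hw : pvWhileUp f0 n = base := pvWhileUp_eq n hn f0
        simp [pvStepA, h, hw]
    have halt : filters2filtersboxconv_alt (f0 :: rest) n
        = base :: (List.range rest.length).map (fun i => base * 2 ^ (i + 1)) := by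
      rw [show filters2filtersboxconv_alt (f0 :: rest) n
            = (List.range (f0 :: rest).length).map
                (fun i : Nat => (f0 + PySem.Int.mod (-f0) |n|) <<< i) from rfl]
      rw [hmodeq, ← hbase, List.length_cons, List.range_succ_eq_map, List.map_cons, List.map_map]
      congr 1
      · simp [Int.shiftLeft_eq]
      · apply List.map_congr_left
        intro i _
        simp [Function.comp_apply, Int.shiftLeft_eq, pow_succ]
    show (List.foldl (pvStepA n) ([], false, 0) (f0 :: rest)).1 = _
    rw [List.foldl_cons, hstep, pvFold_true, halt]
    simp
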